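-- pv_equiv track=rewrite | github.com/pwmcclung/newCodeProbs | remove.py | reverse_invert
-- ===== SOURCE A (Python) =====
-- def reverse_invert(lst):
--     result = []
--     for item in lst:
--         if isinstance(item, int):
--             item_str = str(abs(item))
--             reversed_item_str = item_str[::-1]
--             reversed_item = int(reversed_item_str)
--
--             if item >= 0:
--                 result.append(-reversed_item)
--             else:
--                 result.append(reversed_item)
--
--     return result
-- ===== SOURCE B (Python) =====
-- def _rev_digits(n):
--     rev = 0
--     while n > 0:
--         rev = rev * 10 + n % 10
--         n //= 10
--     return rev
--
--
-- def reverse_invert(lst):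
--     return [-_rev_digits(item) if item >= 0 else _rev_digits(-item) for item in lst]
-- ===== Notes on version B (the rewrite author's own statement) =====
-- stated objective: alternative
-- what changed: Replaces A's per-element str/slice/int round-trip with a pure arithmetic digit-reversal loop (rev = rev*10 + n%10; n //= 10) inside a list comprehension; no string is built or parsed.
import Mathlib
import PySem

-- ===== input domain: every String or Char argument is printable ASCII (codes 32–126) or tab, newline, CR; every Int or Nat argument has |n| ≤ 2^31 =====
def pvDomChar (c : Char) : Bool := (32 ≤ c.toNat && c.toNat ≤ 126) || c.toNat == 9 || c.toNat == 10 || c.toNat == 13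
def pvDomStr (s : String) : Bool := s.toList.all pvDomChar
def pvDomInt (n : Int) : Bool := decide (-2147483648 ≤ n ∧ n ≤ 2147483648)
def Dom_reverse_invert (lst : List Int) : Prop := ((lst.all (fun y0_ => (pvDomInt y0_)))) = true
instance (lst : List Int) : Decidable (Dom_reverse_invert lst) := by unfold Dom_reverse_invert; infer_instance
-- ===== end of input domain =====

-- B replaces A's per-element str/slice/int round-trip by an arithmetic digit-reversal loop (alternative algorithm, same cost; return value identical).

-- ===== PORT A =====
-- hand port of Python's int(s): here int() is applied ONLY to the digit-only, non-empty
-- strings produced by str(abs(item))[::-1], and on those it is exactly this left-to-right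
-- accumulator walk (PySem.Int.ofStr? computes the same values there, but its parser
-- internals are private, so the int() step is ported by hand, step for step).
def pvIntOfDigits (cs : List Char) (acc : Nat) : Nat :=
  match cs with
  | [] => acc
  | c :: rest => pvIntOfDigits rest (acc * 10 + (c.toNat - 48))

def reverse_invert (lst : List Int) : List Int :=
  -- result = []; for item in lst: … result.append(…); return result
  lst.foldl (fun result item =>
    -- isinstance(item, int) is always true for lst : List Int
    let itemStr := PySem.Int.toChars (item.natAbs : Int)          -- str(abs(item))
    let reversedItemStr := (PySem.List.slice? itemStr none none (-1)).getD []  -- item_str[::-1]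
    let reversedItem : Int := (pvIntOfDigits reversedItemStr 0 : Nat)          -- int(reversed_item_str)
    if 0 ≤ item then result ++ [-reversedItem] else result ++ [reversedItem]) []

-- ===== PORT B =====
-- while n > 0: rev = rev*10 + n%10; n //= 10
def pvRevDigits (n : Nat) (rev : Nat) : Nat :=
  if n = 0 then rev else pvRevDigits (n / 10) (rev * 10 + n % 10)
decreasing_by exact Nat.div_lt_self (Nat.pos_of_ne_zero (by assumption)) (by omega)

def reverse_invert_alt (lst : List Int) : List Int :=
  lst.map (fun item =>
    if 0 ≤ item then -(pvRevDigits item.natAbs 0 : Nat) else (pvRevDigits item.natAbs 0 : Nat))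

-- ===== PRECONDITION & SPEC =====
def Spec_reverse_invert (lst : List Int) (out : List Int) : Prop := out = reverse_invert_alt lst
instance (lst : List Int) (out : List Int) : Decidable (Spec_reverse_invert lst out) := by unfold Spec_reverse_invert; infer_instance

-- ===== CLAIM (what is proved, stated in full; the proofs are below) =====
def Claim_equal_reverse_invert : Prop := ∀ (lst : List Int), Dom_reverse_invert lst → Spec_reverse_invert lst (reverse_invert lst)

-- ===== LEMMAS AND PROOFS =====

-- value of a decimal digit character
theorem pv_digitChar_val : ∀ d : Nat, d < 10 → (Nat.digitChar d).toNat - 48 = d := by decide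

-- the digit-reversal accumulator walk over str(m) reversed equals the arithmetic loop
theorem pv_core (m : Nat) : ∀ acc : Nat, 0 < m →
    pvIntOfDigits ((Nat.toDigits 10 m).reverse) acc = pvRevDigits m acc := by
  induction m using Nat.strong_induction_on with
  | _ m ih =>
    intro acc hm
    rw [Nat.toDigits_eq_if (by omega)]
    by_cases h10 : m < 10
    · simp only [if_pos h10, List.reverse_cons, List.reverse_nil, List.nil_append]
      rw [pvIntOfDigits, pvIntOfDigits, pv_digitChar_val m h10]
      rw [pvRevDigits, if_neg (by omega), Nat.mod_eq_of_lt h10, Nat.div_eq_of_lt h10]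
      rw [pvRevDigits, if_pos rfl]
    · simp only [if_neg h10, List.reverse_append, List.reverse_cons, List.reverse_nil,
        List.nil_append, List.cons_append]
      rw [pvIntOfDigits, pv_digitChar_val (m % 10) (Nat.mod_lt m (by omega))]
      rw [ih (m / 10) (Nat.div_lt_self hm (by omega)) _ (by omega)]
      conv_rhs => rw [pvRevDigits]
      rw [if_neg (show ¬ m = 0 by omega)]

-- per-element equality of the two loop bodies
theorem pv_elem (item : Int) :
    ((if 0 ≤ item
        then -(((pvIntOfDigits ((PySem.List.slice? (PySem.Int.toChars (item.natAbs : Int)) none none (-1)).getD []) 0 : Nat) : Int))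
        else (((pvIntOfDigits ((PySem.List.slice? (PySem.Int.toChars (item.natAbs : Int)) none none (-1)).getD []) 0 : Nat) : Int)))
      : Int)
    = if 0 ≤ item then -((pvRevDigits item.natAbs 0 : Nat) : Int) else ((pvRevDigits item.natAbs 0 : Nat) : Int) := by
  rw [PySem.List.slice?_none_none_neg_one, Option.getD_some]
  have htc : PySem.Int.toChars (item.natAbs : Int) = Nat.toDigits 10 item.natAbs := by
    simp [PySem.Int.toChars, not_lt.mpr (abs_nonneg item)]
    rw [Int.abs_eq_natAbs, Int.toNat_natCast]
  rw [htc]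
  rcases Nat.eq_zero_or_pos item.natAbs with h0 | hpos
  · have h1 : pvIntOfDigits ((Nat.toDigits 10 0).reverse) 0 = 0 := by
      rw [Nat.toDigits_zero]; rfl
    have h2 : pvRevDigits 0 0 = 0 := by rw [pvRevDigits]; simp
    rw [h0, h1, h2]
  · rw [pv_core item.natAbs 0 hpos]

-- A's append-accumulator loop is a map
theorem pv_foldl_shape (lst : List Int) (init : List Int) :
    lst.foldl (fun result item =>
      let itemStr := PySem.Int.toChars (item.natAbs : Int)
      let reversedItemStr := (PySem.List.slice? itemStr none none (-1)).getD []
      let reversedItem : Int := (pvIntOfDigits reversedItemStr 0 : Nat)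
      if 0 ≤ item then result ++ [-reversedItem] else result ++ [reversedItem]) init
    = init ++ lst.map (fun item =>
        if 0 ≤ item
          then -(((pvIntOfDigits ((PySem.List.slice? (PySem.Int.toChars (item.natAbs : Int)) none none (-1)).getD []) 0 : Nat) : Int))
          else (((pvIntOfDigits ((PySem.List.slice? (PySem.Int.toChars (item.natAbs : Int)) none none (-1)).getD []) 0 : Nat) : Int))) := by
  induction lst generalizing init with
  | nil => simp
  | cons x xs ihx =>
    simp only [List.foldl_cons, List.map_cons]
    rw [ihx]
    split_ifs <;> simp

-- ===== VERDICT (by name: the statement is the Claim_ definition above) =====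
theorem reverse_invert_spec : Claim_equal_reverse_invert := by
  intro lst _
  unfold Spec_reverse_invert reverse_invert reverse_invert_alt
  rw [pv_foldl_shape lst []]
  simp only [List.nil_append]
  exact List.map_congr_left (fun item _ => pv_elem item)
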